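-- pv_equiv track=rewrite | github.com/mlegoue/convex | Cordal/context_to_cordal.py | parties_kel
-- ===== SOURCE A (Python) =====
-- def parties_kel(a, k):
--     def fn(n, source, en_cours, tout):
--         if (n == 0):
--             if (len(en_cours) > 0):
--                 tout.append(en_cours)
--             return
--         for j in range(0, len(source)):
--             fn(n - 1, source[j + 1:], en_cours + [source[j]], tout)
--         return
--     tout = []
--     for i in range(2, k+1):
--         fn(i, a, [], tout)
--     if k == len(a):
--         tout.append(a)
--     return tout
-- ===== SOURCE B (Python) =====
-- def parties_kel(a, k):
--     def combs(n, xs):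
--         # all n-element combinations of xs, in lexicographic index order
--         if n == 0:
--             return [[]]
--         if len(xs) < n:
--             return []
--         head, rest = xs[0], xs[1:]
--         return [[head] + c for c in combs(n - 1, rest)] + combs(n, rest)
--     tout = []
--     for i in range(2, k + 1):
--         tout += combs(i, a)
--     if k == len(a):
--         tout.append(a)
--     return tout
-- ===== Notes on version B (the rewrite author's own statement) =====
-- stated objective: alternative
-- what changed: Replaces A's accumulator-threading recursion (inner fn mutating a shared tout, slicing source at every index) by a pure combs(n, xs) that returns the list of n-combinations directly via head-in/head-out structural recursion, concatenated per size.
import Mathlib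
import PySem

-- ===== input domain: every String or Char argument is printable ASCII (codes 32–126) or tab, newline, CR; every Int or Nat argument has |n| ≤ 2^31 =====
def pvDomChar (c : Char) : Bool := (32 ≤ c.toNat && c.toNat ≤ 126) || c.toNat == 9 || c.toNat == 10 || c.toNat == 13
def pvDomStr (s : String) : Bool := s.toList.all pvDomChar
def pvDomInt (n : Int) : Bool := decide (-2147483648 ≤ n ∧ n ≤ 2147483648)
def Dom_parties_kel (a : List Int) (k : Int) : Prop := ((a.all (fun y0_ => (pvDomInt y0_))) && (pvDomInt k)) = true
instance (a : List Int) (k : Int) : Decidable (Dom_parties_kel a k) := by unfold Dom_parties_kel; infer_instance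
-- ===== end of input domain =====

-- B replaces A's accumulator-threading recursion by a pure combs(n, xs) returning combinations
-- directly (alternative decomposition, same values, no speed claim).


-- ===== PORT A =====
-- Python's inner `fn`, with the loop `for j in range(0, len(source)): fn(n-1, source[j+1:],
-- en_cours+[source[j]], tout)` ported as the structural traversal pkLoop: iteration j picks
-- source[j] (the head after j heads are dropped) and recurses on source[j+1:] (its tail) —
-- exact, since the loop visits j = 0..len(source)-1 in order and source[j+1:] = drop (j+1) source.
mutual
def pkFn (n : Int) (source en_cours : List Int) (tout : List (List Int)) : List (List Int) :=
  if n = 0 then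
    (if en_cours.length > 0 then tout ++ [en_cours] else tout)
  else
    pkLoop n source en_cours tout
  termination_by (source.length, 1)
def pkLoop (n : Int) (source en_cours : List Int) (tout : List (List Int)) : List (List Int) :=
  match source with
  | [] => tout
  | x :: rest => pkLoop n rest en_cours (pkFn (n - 1) rest (en_cours ++ [x]) tout)
  termination_by (source.length, 0)
end

def parties_kel (a : List Int) (k : Int) : List (List Int) :=
  let tout := (PySem.List.pyRange 2 (k + 1) 1).foldl (fun t i => pkFn i a [] t) []
  if k = (a.length : Int) then tout ++ [a] else tout

-- ===== PORT B =====
-- `combs` from Source B. On the (unreachable from parties_kel_alt) call `combs n []` with n < 0,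
-- Python would raise IndexError; the port returns [] there.
def pkCombs (n : Int) (xs : List Int) : List (List Int) :=
  if n = 0 then [[]]
  else if (xs.length : Int) < n then []
  else
    match xs with
    | [] => []
    | head :: rest => (pkCombs (n - 1) rest).map (fun c => head :: c) ++ pkCombs n rest
  termination_by xs.length

def parties_kel_alt (a : List Int) (k : Int) : List (List Int) :=
  let tout := (PySem.List.pyRange 2 (k + 1) 1).foldl (fun t i => t ++ pkCombs i a) []
  if k = (a.length : Int) then tout ++ [a] else tout

-- ===== PRECONDITION & SPEC =====
def Spec_parties_kel (a : List Int) (k : Int) (out : List (List Int)) : Prop := out = parties_kel_alt a k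
instance (a : List Int) (k : Int) (out : List (List Int)) : Decidable (Spec_parties_kel a k out) := by unfold Spec_parties_kel; infer_instance

-- ===== CLAIM (what is proved, stated in full; the proofs are below) =====
def Claim_equal_parties_kel : Prop := ∀ (a : List Int) (k : Int), Dom_parties_kel a k → Spec_parties_kel a k (parties_kel a k)

-- ===== LEMMAS AND PROOFS =====

-- what A's loop over `source` contributes, relative to en_cours/tout
def pkLC (n : Int) (xs : List Int) : List (List Int) :=
  match xs with
  | [] => []
  | x :: rest => (pkCombs (n - 1) rest).map (fun c => x :: c) ++ pkLC n rest

theorem pkCombs_nil_of_lt (n : Int) (xs : List Int) (hn : n ≠ 0)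
    (h : (xs.length : Int) < n) : pkCombs n xs = [] := by
  rw [pkCombs.eq_def, if_neg hn, if_pos h]

theorem pkLC_nil_of_lt (n : Int) (xs : List Int)
    (h : (xs.length : Int) < n) : pkLC n xs = [] := by
  induction xs with
  | nil => rfl
  | cons x rest ih =>
    simp only [List.length_cons] at h ih
    rw [pkLC, pkCombs_nil_of_lt (n - 1) rest (by push_cast at h ⊢; omega) (by push_cast at h ⊢; omega)]
    push_cast at h
    rw [ih (by omega)]
    simp

theorem pkCombs_eq_pkLC (n : Int) (xs : List Int) (hn : n ≠ 0) :
    pkCombs n xs = pkLC n xs := by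
  induction xs generalizing n with
  | nil =>
    rw [pkCombs.eq_def, pkLC, if_neg hn]
    split <;> rfl
  | cons x rest ih =>
    rw [pkCombs.eq_def, pkLC, if_neg hn]
    by_cases h : (((x :: rest).length : Int) < n)
    · have h0 := pkLC_nil_of_lt n (x :: rest) h
      rw [pkLC] at h0
      rw [if_pos h]
      exact h0.symm
    · rw [if_neg h]
      show (pkCombs (n - 1) rest).map (fun c => x :: c) ++ pkCombs n rest = _
      rw [ih n hn]

theorem pkFn_eq (m : Nat) : ∀ (source : List Int), source.length ≤ m →
    ∀ (n : Int) (ec : List Int) (tout : List (List Int)), (n ≠ 0 ∨ ec ≠ []) →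
    pkFn n source ec tout = tout ++ (pkCombs n source).map (fun c => ec ++ c) := by
  induction m with
  | zero =>
    intro source hs n ec tout hc
    have hsrc : source = [] := by cases source with
      | nil => rfl
      | cons x r => simp at hs
    subst hsrc
    by_cases hn : n = 0
    · subst hn
      rcases hc with hc | hc
      · exact absurd rfl hc
      · rw [pkFn.eq_def, pkCombs.eq_def]
        have hl : ec.length > 0 := by cases ec <;> simp_all
        simp [hl]
    · rw [pkFn.eq_def, if_neg hn, pkLoop.eq_def, pkCombs.eq_def, if_neg hn]
      split <;> simp_all
  | succ m ih =>
    intro source hs n ec tout hc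
    by_cases hn : n = 0
    · subst hn
      rcases hc with hc | hc
      · exact absurd rfl hc
      · rw [pkFn.eq_def, pkCombs.eq_def]
        have hl : ec.length > 0 := by cases ec <;> simp_all
        simp [hl]
    · rw [pkFn.eq_def, if_neg hn, pkCombs_eq_pkLC n source hn]
      clear hc
      induction source generalizing tout with
      | nil => rw [pkLoop.eq_def, pkLC]; simp
      | cons x rest ihs =>
        rw [pkLoop.eq_def, pkLC]
        have hr : rest.length ≤ m := by simp at hs; omega
        show pkLoop n rest ec (pkFn (n - 1) rest (ec ++ [x]) tout) = _
        rw [ih rest hr (n - 1) (ec ++ [x]) tout (Or.inr (by simp))]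
        rw [ihs (by omega) (tout ++ List.map (fun c => ec ++ [x] ++ c) (pkCombs (n - 1) rest))]
        simp [Function.comp_def]

theorem pkFn_eq_main (n : Int) (a : List Int) (t : List (List Int)) (hn : n ≠ 0) :
    pkFn n a [] t = t ++ pkCombs n a := by
  rw [pkFn_eq a.length a le_rfl n [] t (Or.inl hn)]
  simp

-- ===== VERDICT (by name: the statement is the Claim_ definition above) =====
theorem parties_kel_spec : Claim_equal_parties_kel := by
  intro a k _
  unfold Spec_parties_kel parties_kel parties_kel_alt
  have hfold : (PySem.List.pyRange 2 (k + 1) 1).foldl (fun t i => pkFn i a [] t) []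
      = (PySem.List.pyRange 2 (k + 1) 1).foldl (fun t i => t ++ pkCombs i a) [] := by
    apply PySem.List.foldl_congr_mem
    intro acc x hx
    have hx2 : 2 ≤ x := (PySem.List.mem_pyRange_one.mp hx).1
    exact pkFn_eq_main x a acc (by omega)
  simp only [hfold]
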